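-- pv_equiv track=rewrite | github.com/PhilippeMG/EI1022-Algoritmia | Entregable3/entregable3_borja.py | get_letters
-- ===== SOURCE A (Python) =====
-- def get_letters(word_list, word_solution):
--     sol = [] # Se introducen las letras de derecha a izquierda
--
--     tamanyo_palabras = []
--     for w in word_list:
--         tamanyo_palabras.append(len(w))
--     tamanyo_palabras.append(len(word_solution))
--
--     bigest_word = max(tamanyo_palabras)
--     for i in range(1, bigest_word + 1):
--         for word in word_list: # Por cada word
--             if i <= len(word) and word[-i] not in sol:  # Si el índice es válido y la letra no está en la lista
--                 sol.append(word[-i])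
--
--
--         if i <= len(word_solution) and word_solution[-i] not in sol:
--             letter_sol = word_solution[-i]
--             sol.append(letter_sol)
--
--     return sol
-- ===== SOURCE B (Python) =====
-- def get_letters(word_list, word_solution):
--     # Different algorithm: one row-major pass records, for every distinct letter,
--     # the rank of its earliest position in column-major (column, word) order;
--     # sorting the distinct letters by that rank yields A's first-occurrence list.
--     words = word_list + [word_solution]
--     n = len(words)
--     first = {}
--     for j, w in enumerate(words):
--         m = len(w)
--         for i in range(m):
--             ch = w[m - 1 - i]
--             r = i * n + j
--             if ch not in first or r < first[ch]:
--                 first[ch] = r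
--     return sorted(first, key=first.get)
-- ===== Notes on version B (the rewrite author's own statement) =====
-- stated objective: faster
-- what changed: A's column-major nested scan with an append-if-absent list membership test is replaced by a different algorithm: one row-major pass over the words records each distinct letter's minimal column-major rank i*len(words)+j in a dict, and the result is the distinct letters sorted by that rank (no dedup scan, no per-column re-scan of every word).
import Mathlib
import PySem

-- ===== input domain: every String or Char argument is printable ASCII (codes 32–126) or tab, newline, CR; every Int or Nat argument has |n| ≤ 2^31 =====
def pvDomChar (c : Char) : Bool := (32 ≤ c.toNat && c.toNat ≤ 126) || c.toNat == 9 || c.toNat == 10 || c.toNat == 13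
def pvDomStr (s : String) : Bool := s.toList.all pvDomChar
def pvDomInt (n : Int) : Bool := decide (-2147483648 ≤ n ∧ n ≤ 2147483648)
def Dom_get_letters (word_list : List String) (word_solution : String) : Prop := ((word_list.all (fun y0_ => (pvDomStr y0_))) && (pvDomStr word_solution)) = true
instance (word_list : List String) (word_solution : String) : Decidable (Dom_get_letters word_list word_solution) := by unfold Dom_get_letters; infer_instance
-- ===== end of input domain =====

-- B replaces A's column-major nested scan with append-if-absent by a different
-- algorithm: one row-major pass recording each distinct letter's minimal
-- column-major rank in a dict, then sorting the distinct letters by that rank.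

-- ===== PORT A =====
-- one letter of a word as a 1-char Python string; the .getD is only reached under
-- the guard i ≤ len(word), where pyGet? is some (exact)
def pvLetter (w : String) (i : Int) : String :=
  String.ofList [((PySem.Str.pyGet? w (-i)).getD ' ')]

def get_letters (word_list : List String) (word_solution : String) : List String :=
  let tam : List Int := word_list.foldl (fun acc w => acc ++ [PySem.Str.len w]) []
  let tam := tam ++ [PySem.Str.len word_solution]
  -- python max(tam): tam is always nonempty here, so max? is some and getD is never the default
  let bigest : Int := (PySem.List.max? tam (fun y => y)).getD 0
  (PySem.List.pyRange 1 (bigest + 1) 1).foldl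
    (fun sol i =>
      let sol := word_list.foldl
        (fun sol word =>
          if i ≤ PySem.Str.len word ∧ pvLetter word i ∉ sol then sol ++ [pvLetter word i]
          else sol) sol
      if i ≤ PySem.Str.len word_solution ∧ pvLetter word_solution i ∉ sol then
        sol ++ [pvLetter word_solution i]
      else sol)
    []

-- ===== PORT B =====
-- w[m-1-i] with 0 ≤ i < m is always in range, so pyGet? is some and getD is never the default
def pvLetB (w : String) (i : Int) : String :=
  String.ofList [((PySem.Str.pyGet? w (PySem.Str.len w - 1 - i)).getD ' ')]

def get_letters_alt (word_list : List String) (word_solution : String) : List String :=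
  let words := word_list ++ [word_solution]
  let n : Int := words.length
  let first : PySem.Dict String Int :=
    (PySem.List.enumerate words).foldl
      (fun first jw =>
        let j := jw.1
        let w := jw.2
        let m := PySem.Str.len w
        (PySem.List.pyRange 0 m 1).foldl
          (fun first i =>
            let ch := pvLetB w i
            let r := i * n + j
            if first.contains ch = false ∨ r < first.getD ch 0 then first.insert ch r
            else first)
          first)
      PySem.Dict.empty
  -- python sorted(first, key=first.get): every key is present, so first.get = getD _ 0 there
  PySem.List.sorted first.keys (fun ch => first.getD ch 0) false

-- ===== PRECONDITION & SPEC =====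
def Spec_get_letters (word_list : List String) (word_solution : String) (out : List String) : Prop := out = get_letters_alt word_list word_solution
instance (word_list : List String) (word_solution : String) (out : List String) : Decidable (Spec_get_letters word_list word_solution out) := by unfold Spec_get_letters; infer_instance

-- ===== CLAIM (what is proved, stated in full; the proofs are below) =====
def Claim_equal_get_letters : Prop := ∀ (word_list : List String) (word_solution : String), Dom_get_letters word_list word_solution → Spec_get_letters word_list word_solution (get_letters word_list word_solution)

-- ===== LEMMAS AND PROOFS =====

-- the append-if-absent step of A's loops
def pvIns (sol : List String) (x : String) : List String :=
  if x ∈ sol then sol else sol ++ [x]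

-- keep-first dedup in recursive form (used to run the induction of pvCore)
def pvDedupF : List String → List String
  | [] => []
  | x :: s => x :: pvDedupF (s.filter (fun y => y != x))
  termination_by l => l.length
  decreasing_by
    simp only [List.length_unattach]
    exact Nat.lt_succ_of_le (le_trans (List.length_filter_le _ _) (by simp))

-- B's conditional-insert step on a (letter, rank) pair
def pvUpd (d : PySem.Dict String Int) (p : String × Int) : PySem.Dict String Int :=
  if d.contains p.1 = false ∨ p.2 < d.getD p.1 0 then d.insert p.1 p.2 else d

-- the row-major (letter, rank) stream B traverses
def pvRow (words : List String) (n : Int) : List (String × Int) :=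
  (PySem.List.enumerate words).flatMap
    (fun jw => (PySem.List.pyRange 0 (PySem.Str.len jw.2) 1).map
      (fun i => (pvLetB jw.2 i, i * n + jw.1)))

-- the column-major (letter, rank) stream underlying A's traversal
def pvCol (words : List String) (n width : Int) : List (String × Int) :=
  (PySem.List.pyRange 0 width 1).flatMap
    (fun i => (PySem.List.enumerate words).filterMap
      (fun jw => if i < PySem.Str.len jw.2 then some (pvLetB jw.2 i, i * n + jw.1) else none))

-- ranks at which letter ch occurs in a (letter, rank) stream
def pvRanks (ch : String) (P : List (String × Int)) : List Int :=
  (P.filter (fun p => p.1 == ch)).map (fun p => p.2)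

-- minimal rank of ch in a stream (0 never read on the letters we compare)
def pvFr (P : List (String × Int)) (ch : String) : Int :=
  ((pvRanks ch P).min?).getD 0

-- min-accumulator of B's dict entry
def pvOmin (o : Option Int) (l : List Int) : Option Int :=
  l.foldl (fun o r => some (o.elim r (fun m => min m r))) o

-- ---- generic dedup facts ----

theorem pvDedupF_cons (x : String) (s : List String) :
    pvDedupF (x :: s) = x :: pvDedupF (s.filter (fun y => y != x)) := by
  rw [pvDedupF]

theorem pvFoldl_pvIns_eq_dedupF (xs : List String) :
    ∀ acc : List String, xs.foldl pvIns acc = acc ++ pvDedupF (xs.filter (fun x => !acc.contains x)) := by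
  induction xs with
  | nil => intro acc; rw [List.foldl_nil, List.filter_nil, pvDedupF]; simp
  | cons x t ih =>
    intro acc
    rw [List.foldl_cons]
    by_cases hx : x ∈ acc
    · have hc : (x :: t).filter (fun y => !acc.contains y) = t.filter (fun y => !acc.contains y) := by
        simp [List.contains_eq_mem, hx]
      have h1 : pvIns acc x = acc := by simp [pvIns, hx]
      rw [h1, hc, ih]
    · have hc : (x :: t).filter (fun y => !acc.contains y) = x :: t.filter (fun y => !acc.contains y) := by
        simp [List.contains_eq_mem, hx]
      have h1 : pvIns acc x = acc ++ [x] := by simp [pvIns, hx]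
      rw [h1, hc, ih, pvDedupF_cons]
      have hfilt : t.filter (fun y => !(acc ++ [x]).contains y)
          = (t.filter (fun y => !acc.contains y)).filter (fun y => y != x) := by
        rw [List.filter_filter]
        apply List.filter_congr
        intro y _
        simp only [List.contains_append, Bool.not_or, List.contains_cons,
          List.contains_nil, Bool.or_false, bne]
        rw [Bool.and_comm]
      rw [hfilt]
      simp

theorem pvFoldl_pvIns_nil (xs : List String) :
    xs.foldl pvIns [] = pvDedupF xs := by
  rw [pvFoldl_pvIns_eq_dedupF xs []]
  simp

theorem pvDedup_eq_foldl (xs : List String) :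
    PySem.List.dedup xs = xs.foldl pvIns [] := by
  have key : ∀ (l acc : List String), List.foldl PySem.Set.add acc l = l.foldl pvIns acc := by
    intro l
    induction l with
    | nil => intro acc; rfl
    | cons x t ih =>
      intro acc
      rw [List.foldl_cons, List.foldl_cons, ih]
      have : PySem.Set.add acc x = pvIns acc x := by
        simp [PySem.Set.add, PySem.Set.contains, pvIns, List.contains_eq_mem]
      rw [this]
  simp only [PySem.List.dedup, PySem.Set.ofList, PySem.Set.empty, key]

theorem pvMem_dedupF (xs : List String) (x : String) : x ∈ pvDedupF xs ↔ x ∈ xs := by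
  rw [← pvFoldl_pvIns_nil, ← pvDedup_eq_foldl]
  exact PySem.List.mem_dedup xs x

theorem pvNodup_dedupF (xs : List String) : (pvDedupF xs).Nodup := by
  rw [← pvFoldl_pvIns_nil, ← pvDedup_eq_foldl]
  exact PySem.List.nodup_dedup xs

-- ---- B's dict fold computes the minimum rank per letter ----

theorem pvOmin_some (m : Int) (l : List Int) : pvOmin (some m) l = some (l.foldl min m) := by
  induction l generalizing m with
  | nil => rfl
  | cons r t ih =>
    show pvOmin (some (min m r)) t = some ((r :: t).foldl min m)
    rw [ih, List.foldl_cons]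

theorem pvOmin_none_eq_min? (l : List Int) : pvOmin none l = l.min? := by
  cases l with
  | nil => rfl
  | cons r t =>
    show pvOmin (some r) t = (r :: t).min?
    rw [pvOmin_some, List.min?_cons']

theorem pvRanks_cons (ch : String) (p : String × Int) (P : List (String × Int)) :
    pvRanks ch (p :: P) = if p.1 = ch then p.2 :: pvRanks ch P else pvRanks ch P := by
  simp only [pvRanks, List.filter_cons]
  by_cases h : p.1 = ch
  · simp [h]
  · simp [h]

theorem pvUpd_get? (d : PySem.Dict String Int) (p : String × Int) (ch : String) :
    (pvUpd d p).get? ch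
      = if p.1 = ch then some ((d.get? ch).elim p.2 (fun m => min m p.2)) else d.get? ch := by
  unfold pvUpd
  cases ho : d.get? p.1 with
  | none =>
    have hc : d.contains p.1 = false := by
      rw [PySem.Dict.contains_eq_isSome_get?, ho]; rfl
    rw [if_pos (Or.inl hc), PySem.Dict.get?_insert]
    by_cases h : p.1 = ch
    · subst h; rw [if_pos rfl, if_pos rfl, ho]; rfl
    · rw [if_neg (fun hh => h hh.symm), if_neg h]
  | some v =>
    have hc : d.contains p.1 = true := by
      rw [PySem.Dict.contains_eq_isSome_get?, ho]; rfl
    have hgd : d.getD p.1 0 = v := by rw [PySem.Dict.getD_eq_get?_getD, ho]; rfl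
    by_cases hlt : p.2 < v
    · rw [if_pos (Or.inr (by rw [hgd]; exact hlt)), PySem.Dict.get?_insert]
      by_cases h : p.1 = ch
      · subst h; rw [if_pos rfl, if_pos rfl, ho]
        simp [min_eq_right (le_of_lt hlt)]
      · rw [if_neg (fun hh => h hh.symm), if_neg h]
    · rw [if_neg (by rw [hc, hgd]; simp [hlt])]
      by_cases h : p.1 = ch
      · subst h; rw [if_pos rfl, ho]
        simp [min_eq_left (le_of_not_gt hlt)]
      · rw [if_neg h]

theorem pvGet?_updFold (P : List (String × Int)) :
    ∀ (d : PySem.Dict String Int) (ch : String),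
      (P.foldl pvUpd d).get? ch = pvOmin (d.get? ch) (pvRanks ch P) := by
  induction P with
  | nil => intro d ch; rfl
  | cons p t ih =>
    intro d ch
    rw [List.foldl_cons, pvRanks_cons, ih, pvUpd_get?]
    by_cases h : p.1 = ch
    · rw [if_pos h, if_pos h]; rfl
    · rw [if_neg h, if_neg h]

theorem pvNodup_keys_updFold (P : List (String × Int)) :
    ∀ d : PySem.Dict String Int, d.keys.Nodup → (P.foldl pvUpd d).keys.Nodup := by
  induction P with
  | nil => intro d h; exact h
  | cons p t ih =>
    intro d h
    rw [List.foldl_cons]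
    apply ih
    unfold pvUpd
    split
    · exact PySem.Dict.nodup_keys_insert d p.1 p.2 h
    · exact h

theorem pvMem_ranks (ch : String) (P : List (String × Int)) (r : Int) :
    r ∈ pvRanks ch P ↔ (ch, r) ∈ P := by
  simp only [pvRanks, List.mem_map, List.mem_filter, beq_iff_eq]
  constructor
  · rintro ⟨p, ⟨hp, h1⟩, h2⟩
    have : p = (ch, r) := by
      cases p; simp only at h1 h2; rw [h1, h2]
    rw [← this]; exact hp
  · intro h
    exact ⟨(ch, r), ⟨h, rfl⟩, rfl⟩

-- ---- row stream vs column stream ----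

theorem pvMem_row_iff (words : List String) (n : Int) (p : String × Int) :
    p ∈ pvRow words n ↔
      ∃ (k : Nat) (hk : k < words.length) (i : Int),
        0 ≤ i ∧ i < PySem.Str.len words[k] ∧ p = (pvLetB words[k] i, i * n + (k : Int)) := by
  simp only [pvRow, List.mem_flatMap, PySem.List.mem_enumerate_iff, List.mem_map,
    PySem.List.mem_pyRange_one]
  constructor
  · rintro ⟨jw, ⟨k, hk, rfl⟩, i, ⟨h0, h1⟩, rfl⟩
    exact ⟨k, hk, i, h0, by simpa using h1, by simp⟩
  · rintro ⟨k, hk, i, h0, h1, rfl⟩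
    exact ⟨((k : Int), words[k]), ⟨k, hk, by simp⟩, i, ⟨h0, h1⟩, by simp⟩

theorem pvMem_col_iff (words : List String) (n width : Int) (p : String × Int) :
    p ∈ pvCol words n width ↔
      ∃ (i : Int), 0 ≤ i ∧ i < width ∧
        ∃ (k : Nat) (hk : k < words.length),
          i < PySem.Str.len words[k] ∧ p = (pvLetB words[k] i, i * n + (k : Int)) := by
  simp only [pvCol, List.mem_flatMap, PySem.List.mem_enumerate_iff, List.mem_filterMap,
    PySem.List.mem_pyRange_one, Option.ite_none_right_eq_some, Option.some.injEq]
  constructor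
  · rintro ⟨i, ⟨h0, h1⟩, jw, ⟨k, hk, rfl⟩, hlt, rfl⟩
    exact ⟨i, h0, h1, k, hk, by simpa using hlt, by simp⟩
  · rintro ⟨i, h0, h1, k, hk, hlt, rfl⟩
    exact ⟨i, ⟨h0, h1⟩, ((k : Int), words[k]), ⟨k, hk, by simp⟩, hlt, by simp⟩

theorem pvMem_row_col (words : List String) (n width : Int)
    (hw : ∀ w ∈ words, PySem.Str.len w ≤ width) (p : String × Int) :
    p ∈ pvRow words n ↔ p ∈ pvCol words n width := by
  rw [pvMem_row_iff, pvMem_col_iff]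
  constructor
  · rintro ⟨k, hk, i, h0, h1, rfl⟩
    exact ⟨i, h0, lt_of_lt_of_le h1 (hw words[k] (List.getElem_mem hk)), k, hk, h1, rfl⟩
  · rintro ⟨i, h0, _, k, hk, h1, rfl⟩
    exact ⟨k, hk, i, h0, h1, rfl⟩

theorem pvMin_row_col (words : List String) (n width : Int)
    (hw : ∀ w ∈ words, PySem.Str.len w ≤ width) (ch : String) :
    (pvRanks ch (pvRow words n)).min? = (pvRanks ch (pvCol words n width)).min? := by
  have hm : ∀ r, r ∈ pvRanks ch (pvRow words n) ↔ r ∈ pvRanks ch (pvCol words n width) := by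
    intro r
    rw [pvMem_ranks, pvMem_ranks, pvMem_row_col words n width hw]
  cases hc : (pvRanks ch (pvCol words n width)).min? with
  | none =>
    rw [List.min?_eq_none_iff] at hc ⊢
    rw [List.eq_nil_iff_forall_not_mem]
    intro r hr
    rw [hm] at hr
    rw [hc] at hr
    exact absurd hr (List.not_mem_nil)
  | some m =>
    rw [List.min?_eq_some_iff] at hc ⊢
    exact ⟨(hm m).mpr hc.1, fun b hb => hc.2 b ((hm b).mp hb)⟩

theorem pvBlock_bound (words : List String) (n i : Int) (hn : n = (words.length : Int))
    (x : String × Int)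
    (hx : x ∈ (PySem.List.enumerate words).filterMap
      (fun jw => if i < PySem.Str.len jw.2 then some (pvLetB jw.2 i, i * n + jw.1) else none)) :
    i * n ≤ x.2 ∧ x.2 < (i + 1) * n := by
  rw [List.mem_filterMap] at hx
  obtain ⟨jw, hjw, hfx⟩ := hx
  rw [PySem.List.mem_enumerate_iff] at hjw
  obtain ⟨k, hk, rfl⟩ := hjw
  by_cases hlt : i < PySem.Str.len words[k]
  · rw [if_pos hlt] at hfx
    obtain rfl := Option.some.inj hfx
    have hkn : (k : Int) < n := by rw [hn]; exact_mod_cast hk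
    have hring : (i + 1) * n = i * n + n := by ring
    simp only []
    omega
  · rw [if_neg hlt] at hfx
    exact absurd hfx (by simp)

theorem pvPairwise_col (words : List String) (width : Int) (hn : 0 < words.length) :
    (pvCol words (words.length : Int) width).Pairwise (fun p q => p.2 < q.2) := by
  unfold pvCol
  set n : Int := (words.length : Int) with hn'
  rw [List.pairwise_flatMap]
  constructor
  · intro i _
    rw [List.pairwise_filterMap]
    apply List.Pairwise.imp_of_mem (l := PySem.List.enumerate words)
      (R := fun p q => p.1 < q.1)
    · intro jw jw' _ _ hlt b hb b' hb'
      by_cases h1 : i < PySem.Str.len jw.2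
      · rw [if_pos h1] at hb
        by_cases h2 : i < PySem.Str.len jw'.2
        · rw [if_pos h2] at hb'
          obtain rfl := Option.some.inj hb
          obtain rfl := Option.some.inj hb'
          simpa using hlt
        · rw [if_neg h2] at hb'; exact absurd hb' (by simp)
      · rw [if_neg h1] at hb; exact absurd hb (by simp)
    · exact PySem.List.pairwise_lt_enumerate words 0
  · apply List.Pairwise.imp_of_mem (l := PySem.List.pyRange 0 width 1)
      (R := fun a b => a < b)
    · intro i i' hi hi' hlt x hx y hy
      rw [PySem.List.mem_pyRange_one] at hi hi'
      have hbx := pvBlock_bound words n i rfl x hx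
      have hby := pvBlock_bound words n i' rfl y hy
      have h1 : (i + 1) * n ≤ i' * n := by
        apply mul_le_mul_of_nonneg_right (by omega) (by positivity)
      omega
    · exact PySem.List.pairwise_lt_pyRange_one 0 width

-- ---- the core: dedup of a rank-sorted stream is ordered by minimal rank ----

theorem pvFr_eq_of_ne (T : List (String × Int)) (p : String × Int) (b : String) (hb : b ≠ p.1) :
    pvFr (p :: T) b = pvFr T b := by
  unfold pvFr
  rw [pvRanks_cons, if_neg (fun h => hb h.symm)]

theorem pvRanks_filter_of_ne (T : List (String × Int)) (x b : String) (hb : b ≠ x) :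
    pvRanks b (T.filter (fun q => q.1 != x)) = pvRanks b T := by
  unfold pvRanks
  rw [List.filter_filter]
  congr 1
  apply List.filter_congr
  intro q _
  by_cases h : q.1 = b
  · rw [h]
    simp [bne_iff_ne, hb]
  · simp [h]

theorem pvFr_filter_of_ne (T : List (String × Int)) (x b : String) (hb : b ≠ x) :
    pvFr (T.filter (fun q => q.1 != x)) b = pvFr T b := by
  unfold pvFr
  rw [pvRanks_filter_of_ne T x b hb]

theorem pvNe_of_mem_filter_map (T : List (String × Int)) (x : String) (a : String)
    (ha : a ∈ (T.filter (fun q => q.1 != x)).map Prod.fst) : a ≠ x := by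
  obtain ⟨q, hq, rfl⟩ := List.mem_map.mp ha
  have h2 := (List.mem_filter.mp hq).2
  simpa [bne] using h2

theorem pvFr_pos_of_mem (T : List (String × Int)) (b : String)
    (hb : b ∈ T.map Prod.fst) (r : Int) (hr : ∀ q ∈ T, r < q.2) :
    r < pvFr T b := by
  obtain ⟨q, hq, rfl⟩ := List.mem_map.mp hb
  have hmem : q.2 ∈ pvRanks q.1 T := (pvMem_ranks q.1 T q.2).mpr (by
    have : q = (q.1, q.2) := rfl
    rw [← this]; exact hq)
  cases hmin : (pvRanks q.1 T).min? with
  | none =>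
    rw [List.min?_eq_none_iff] at hmin
    rw [hmin] at hmem
    exact absurd hmem (List.not_mem_nil)
  | some m =>
    have hm := List.min?_mem hmin
    have : (q.1, m) ∈ T := (pvMem_ranks q.1 T m).mp hm
    unfold pvFr
    rw [hmin]
    exact hr _ this

theorem pvCore : ∀ (N : Nat) (T : List (String × Int)), T.length ≤ N →
    T.Pairwise (fun p q => p.2 < q.2) →
    (pvDedupF (T.map Prod.fst)).Pairwise (fun a b => pvFr T a < pvFr T b) := by
  intro N
  induction N with
  | zero =>
    intro T hT _
    rw [List.length_eq_zero_iff.mp (Nat.le_zero.mp hT)]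
    rw [List.map_nil, pvDedupF]
    exact List.Pairwise.nil
  | succ N ih =>
    intro T hT hp
    cases T with
    | nil => rw [List.map_nil, pvDedupF]; exact List.Pairwise.nil
    | cons p T' =>
      rw [List.map_cons, pvDedupF_cons]
      have hhd : ∀ q ∈ T', p.2 < q.2 := fun q hq => List.rel_of_pairwise_cons hp hq
      have hp' := hp.of_cons
      have hmapfil : (T'.map Prod.fst).filter (fun y => y != p.1)
          = (T'.filter (fun q => q.1 != p.1)).map Prod.fst := by
        rw [List.filter_map]; rfl
      have hfrp : pvFr (p :: T') p.1 = p.2 := by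
        unfold pvFr
        rw [pvRanks_cons, if_pos rfl]
        have : (p.2 :: pvRanks p.1 T').min? = some p.2 := by
          rw [List.min?_eq_some_iff]
          refine ⟨List.mem_cons_self, ?_⟩
          intro b hb
          rcases List.mem_cons.mp hb with h | h
          · rw [h]
          · exact le_of_lt (hhd (p.1, b) ((pvMem_ranks p.1 T' b).mp h))
        rw [this]
        rfl
      constructor
      · intro b hb
        rw [hmapfil] at hb
        have hbmem := (pvMem_dedupF _ b).mp hb
        have hbne : b ≠ p.1 := pvNe_of_mem_filter_map T' p.1 b hbmem
        rw [hfrp, pvFr_eq_of_ne T' p b hbne]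
        have hbmem' : b ∈ T'.map Prod.fst := by
          obtain ⟨q, hq, rfl⟩ := List.mem_map.mp hbmem
          exact List.mem_map.mpr ⟨q, (List.mem_filter.mp hq).1, rfl⟩
        exact pvFr_pos_of_mem T' b hbmem' p.2 hhd
      · rw [hmapfil]
        have hlen : (T'.filter (fun q => q.1 != p.1)).length ≤ N :=
          le_trans (List.length_filter_le _ _) (Nat.succ_le_succ_iff.mp hT)
        have base := ih _ hlen (hp'.filter _)
        apply base.imp_of_mem
        intro a b ha hb hab
        have ha' := pvNe_of_mem_filter_map T' p.1 a ((pvMem_dedupF _ a).mp ha)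
        have hb' := pvNe_of_mem_filter_map T' p.1 b ((pvMem_dedupF _ b).mp hb)
        rw [pvFr_filter_of_ne T' p.1 a ha', pvFr_filter_of_ne T' p.1 b hb'] at hab
        rw [pvFr_eq_of_ne T' p a ha', pvFr_eq_of_ne T' p b hb']
        exact hab

-- ---- A's loops produce the dedup of the column stream ----

def pvCand (words : List String) (i : Int) : List String :=
  words.filterMap (fun w => if i ≤ PySem.Str.len w then some (pvLetter w i) else none)

theorem pvCand_cons (w : String) (t : List String) (i : Int) :
    pvCand (w :: t) i
      = if i ≤ PySem.Str.len w then pvLetter w i :: pvCand t i else pvCand t i := by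
  simp only [pvCand, List.filterMap_cons]
  by_cases h : i ≤ PySem.Str.len w
  · rw [if_pos h, if_pos h]
  · rw [if_neg h, if_neg h]

theorem pvInnerA (ws : List String) (i : Int) (sol : List String) :
    ws.foldl (fun sol word =>
        if i ≤ PySem.Str.len word ∧ pvLetter word i ∉ sol then sol ++ [pvLetter word i]
        else sol) sol
      = (pvCand ws i).foldl pvIns sol := by
  induction ws generalizing sol with
  | nil => rfl
  | cons w t ih =>
    rw [List.foldl_cons, pvCand_cons]
    by_cases h : i ≤ PySem.Str.len w
    · rw [if_pos h, List.foldl_cons]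
      by_cases hm : pvLetter w i ∈ sol
      · have e1 : (if i ≤ PySem.Str.len w ∧ pvLetter w i ∉ sol then sol ++ [pvLetter w i] else sol) = sol := by
          rw [if_neg]; tauto
        have e2 : pvIns sol (pvLetter w i) = sol := by simp [pvIns, hm]
        rw [e1, e2, ih]
      · have e1 : (if i ≤ PySem.Str.len w ∧ pvLetter w i ∉ sol then sol ++ [pvLetter w i] else sol)
            = sol ++ [pvLetter w i] := by rw [if_pos ⟨h, hm⟩]
        have e2 : pvIns sol (pvLetter w i) = sol ++ [pvLetter w i] := by simp [pvIns, hm]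
        rw [e1, e2, ih]
    · rw [if_neg h]
      have e1 : (if i ≤ PySem.Str.len w ∧ pvLetter w i ∉ sol then sol ++ [pvLetter w i] else sol) = sol := by
        rw [if_neg]; tauto
      rw [e1, ih]

theorem pvStepA (wl : List String) (ws : String) (i : Int) (sol : List String) :
    (if i ≤ PySem.Str.len ws ∧ pvLetter ws i ∉
          wl.foldl (fun sol word =>
            if i ≤ PySem.Str.len word ∧ pvLetter word i ∉ sol then sol ++ [pvLetter word i]
            else sol) sol then
        (wl.foldl (fun sol word =>
            if i ≤ PySem.Str.len word ∧ pvLetter word i ∉ sol then sol ++ [pvLetter word i]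
            else sol) sol) ++ [pvLetter ws i]
      else
        wl.foldl (fun sol word =>
            if i ≤ PySem.Str.len word ∧ pvLetter word i ∉ sol then sol ++ [pvLetter word i]
            else sol) sol)
      = (pvCand (wl ++ [ws]) i).foldl pvIns sol := by
  have hsplit : pvCand (wl ++ [ws]) i = pvCand wl i ++ pvCand [ws] i := by
    simp [pvCand]
  rw [hsplit, List.foldl_append, pvInnerA wl i sol]
  set S := List.foldl pvIns sol (pvCand wl i) with hS
  have hc1 : pvCand [ws] i = if i ≤ PySem.Str.len ws then [pvLetter ws i] else [] := by
    simp only [pvCand, List.filterMap_cons, List.filterMap_nil]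
    by_cases h : i ≤ PySem.Str.len ws
    · rw [if_pos h, if_pos h]
    · rw [if_neg h, if_neg h]
  rw [hc1]
  by_cases h : i ≤ PySem.Str.len ws
  · rw [if_pos h, List.foldl_cons, List.foldl_nil]
    by_cases hm : pvLetter ws i ∈ S
    · rw [if_neg (by tauto)]; simp [pvIns, hm]
    · rw [if_pos ⟨h, hm⟩]; simp [pvIns, hm]
  · rw [if_neg h, if_neg (by tauto), List.foldl_nil]

theorem pvLetEq (w : String) (k : Int) (h0 : 0 ≤ k) (h1 : k < PySem.Str.len w) :
    pvLetB w k = pvLetter w (k + 1) := by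
  unfold pvLetB pvLetter
  have hl := PySem.Str.len_eq w
  rw [hl] at h1
  congr 2
  rw [PySem.Str.pyGet?_eq, PySem.Str.pyGet?_eq, PySem.Chars.pyGet?_eq_listPyGet?,
    PySem.Chars.pyGet?_eq_listPyGet?, hl]
  rw [show -(k + 1) = -((k.toNat + 1 : Nat) : Int) by omega]
  rw [PySem.List.pyGet?_neg_natCast w.toList (k.toNat + 1) (by omega) (by omega)]
  rw [PySem.List.pyGet?_of_nonneg w.toList (by omega)]
  have hidx : (((w.toList.length : Int)) - 1 - k).toNat = w.toList.length - (k.toNat + 1) := by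
    omega
  rw [hidx]

theorem pvCandEq (words : List String) (n : Int) (k : Int) (h0 : 0 ≤ k) :
    ((PySem.List.enumerate words).filterMap
        (fun jw => if k < PySem.Str.len jw.2 then some (pvLetB jw.2 k, k * n + jw.1) else none)).map Prod.fst
      = pvCand words (1 + k) := by
  rw [List.map_filterMap]
  have hopt : ∀ jw : Int × String,
      Option.map Prod.fst (if k < PySem.Str.len jw.2 then some (pvLetB jw.2 k, k * n + jw.1) else none)
        = if k < PySem.Str.len jw.2 then some (pvLetB jw.2 k) else none := by
    intro jw
    by_cases h : k < PySem.Str.len jw.2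
    · rw [if_pos h, if_pos h]; rfl
    · rw [if_neg h, if_neg h]; rfl
  simp only [hopt]
  have henum : words = (PySem.List.enumerate words).map Prod.snd :=
    (PySem.List.map_snd_enumerate words 0).symm
  unfold pvCand
  conv_rhs => rw [henum]
  rw [List.filterMap_map]
  apply List.filterMap_congr
  intro jw _
  show (if k < PySem.Str.len jw.2 then some (pvLetB jw.2 k) else none)
      = (if 1 + k ≤ PySem.Str.len jw.2 then some (pvLetter jw.2 (1 + k)) else none)
  by_cases h : k < PySem.Str.len jw.2
  · rw [if_pos h, if_pos (by omega), show (1 + k) = k + 1 by ring, pvLetEq jw.2 k h0 h]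
  · rw [if_neg h, if_neg (by omega)]

theorem pvColMapFst (words : List String) (n width : Int) :
    (pvCol words n width).map Prod.fst
      = (PySem.List.pyRange 0 width 1).flatMap (fun k => pvCand words (1 + k)) := by
  unfold pvCol
  rw [List.map_flatMap]
  apply List.flatMap_congr
  intro i hi
  rw [PySem.List.mem_pyRange_one] at hi
  exact pvCandEq words n i hi.1

theorem pvGetA (word_list : List String) (word_solution : String) :
    get_letters word_list word_solution
      = pvDedupF ((pvCol (word_list ++ [word_solution]) ((word_list ++ [word_solution]).length : Int)
          ((PySem.List.max? ((word_list ++ [word_solution]).map PySem.Str.len) (fun y => y)).getD 0)).map Prod.fst) := by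
  simp only [get_letters]
  have htam : word_list.foldl (fun acc w => acc ++ [PySem.Str.len w]) [] ++ [PySem.Str.len word_solution]
      = (word_list ++ [word_solution]).map PySem.Str.len := by
    rw [PySem.List.foldl_append_singleton_eq_map]; simp
  rw [htam]
  set b : Int := (PySem.List.max? ((word_list ++ [word_solution]).map PySem.Str.len) (fun y => y)).getD 0 with hb
  simp only [pvStepA]
  rw [pvColMapFst, ← pvFoldl_pvIns_nil, List.foldl_flatMap]
  rw [PySem.List.pyRange_one 1 (b + 1), PySem.List.pyRange_one 0 b]
  have hlen : (b + 1 - 1).toNat = (b - 0).toNat := by omega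
  rw [hlen, List.foldl_map, List.foldl_map]
  apply PySem.List.foldl_congr_mem
  intro acc k _
  simp only [zero_add]

theorem pvGetB (word_list : List String) (word_solution : String) :
    get_letters_alt word_list word_solution
      = PySem.List.sorted
          (((pvRow (word_list ++ [word_solution]) ((word_list ++ [word_solution]).length : Int)).foldl pvUpd PySem.Dict.empty).keys)
          (fun ch => ((pvRow (word_list ++ [word_solution]) ((word_list ++ [word_solution]).length : Int)).foldl pvUpd PySem.Dict.empty).getD ch 0)
          false := by
  simp only [get_letters_alt]
  have hfold : (pvRow (word_list ++ [word_solution]) ((word_list ++ [word_solution]).length : Int)).foldl pvUpd PySem.Dict.empty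
      = (PySem.List.enumerate (word_list ++ [word_solution])).foldl
          (fun first jw =>
            (PySem.List.pyRange 0 (PySem.Str.len jw.2) 1).foldl
              (fun first i =>
                if first.contains (pvLetB jw.2 i) = false ∨
                    i * ((word_list ++ [word_solution]).length : Int) + jw.1 < first.getD (pvLetB jw.2 i) 0
                then first.insert (pvLetB jw.2 i) (i * ((word_list ++ [word_solution]).length : Int) + jw.1)
                else first) first)
          PySem.Dict.empty := by
    rw [pvRow, List.foldl_flatMap]
    apply PySem.List.foldl_congr_mem
    intro d jw _
    rw [List.foldl_map]
    rfl
  rw [hfold]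

-- ===== VERDICT (by name: the statement is the Claim_ definition above) =====
theorem get_letters_spec : Claim_equal_get_letters := by
  intro word_list word_solution _
  simp only [Spec_get_letters]
  rw [pvGetA, pvGetB]
  set words : List String := word_list ++ [word_solution] with hwords
  set n : Int := (words.length : Int) with hn
  set width : Int := (PySem.List.max? (words.map PySem.Str.len) (fun y => y)).getD 0 with hwidth
  set first : PySem.Dict String Int := (pvRow words n).foldl pvUpd PySem.Dict.empty with hfirst
  have hnpos : 0 < words.length := by rw [hwords]; simp
  have hw : ∀ w ∈ words, PySem.Str.len w ≤ width := by
    intro w hwmem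
    cases hmax : PySem.List.max? (words.map PySem.Str.len) (fun y => y) with
    | none =>
      rw [PySem.List.max?_eq_none_iff] at hmax
      rw [List.map_eq_nil_iff] at hmax
      rw [hmax] at hnpos
      exact absurd hnpos (by simp)
    | some m =>
      have := PySem.List.max?_isMax hmax (PySem.Str.len w) (List.mem_map.mpr ⟨w, hwmem, rfl⟩)
      rw [hwidth, hmax]
      exact this
  have hget : ∀ ch, first.get? ch = (pvRanks ch (pvCol words n width)).min? := by
    intro ch
    rw [hfirst, pvGet?_updFold, PySem.Dict.get?_empty, pvOmin_none_eq_min?,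
      pvMin_row_col words n width hw]
  have hkeymem : ∀ ch, ch ∈ first.keys ↔ ch ∈ (pvCol words n width).map Prod.fst := by
    intro ch
    rw [← PySem.Dict.contains_iff_mem_keys]
    rw [PySem.Dict.contains_eq_isSome_get?, hget ch]
    constructor
    · intro h
      cases hm : (pvRanks ch (pvCol words n width)).min? with
      | none => rw [hm] at h; exact absurd h (by simp)
      | some m =>
        have := (pvMem_ranks ch _ m).mp (List.min?_mem hm)
        exact List.mem_map.mpr ⟨(ch, m), this, rfl⟩
    · intro h
      obtain ⟨q, hq, rfl⟩ := List.mem_map.mp h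
      have hr : q.2 ∈ pvRanks q.1 (pvCol words n width) := (pvMem_ranks q.1 _ q.2).mpr (by
        have : q = (q.1, q.2) := rfl
        rw [← this]; exact hq)
      cases hm : (pvRanks q.1 (pvCol words n width)).min? with
      | none =>
        rw [List.min?_eq_none_iff] at hm
        rw [hm] at hr
        exact absurd hr (List.not_mem_nil)
      | some m => simp
  have hkey : ∀ c ∈ (pvCol words n width).map Prod.fst,
      first.getD c 0 = pvFr (pvCol words n width) c := by
    intro c _
    rw [PySem.Dict.getD_eq_get?_getD, hget c]
    rfl
  have hpair : (pvCol words n width).Pairwise (fun p q => p.2 < q.2) := by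
    rw [hn]
    exact pvPairwise_col words width hnpos
  have hnodupK : first.keys.Nodup :=
    pvNodup_keys_updFold _ PySem.Dict.empty PySem.Dict.nodup_keys_empty
  have hperm : (pvDedupF ((pvCol words n width).map Prod.fst)).Perm first.keys := by
    apply (List.perm_ext_iff_of_nodup (pvNodup_dedupF _) hnodupK).mpr
    intro a
    rw [pvMem_dedupF, hkeymem]
  have hpw : (pvDedupF ((pvCol words n width).map Prod.fst)).Pairwise
      (fun a b => first.getD a 0 < first.getD b 0) := by
    have base := pvCore ((pvCol words n width).length) (pvCol words n width) le_rfl hpair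
    apply base.imp_of_mem
    intro a b ha hb hab
    rw [hkey a ((pvMem_dedupF _ a).mp ha), hkey b ((pvMem_dedupF _ b).mp hb)]
    exact hab
  exact (PySem.List.sorted_eq_of_perm_of_pairwise_lt first.keys _ _ hperm hpw).symm
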